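-- pv_equiv track=rewrite | github.com/MatthewRBevins/Daily-Coding-Problems | day60.py | equal_sum_split_check_helper
-- ===== SOURCE A (Python) =====
-- from typing import List
--
-- def equal_sum_split_check_helper(
--     arr: List[int], start: int, stop: int, sum_inner: int, sum_outer: int
-- ) -> bool:
--     if start >= stop:
--         return False
--     elif sum_inner == sum_outer:
--         return True
--     # checking for all possible splits
--     return equal_sum_split_check_helper(
--         arr, start + 1, stop, sum_inner - arr[start], sum_outer + arr[start]
--     ) or equal_sum_split_check_helper(
--         arr, start, stop - 1, sum_inner - arr[stop], sum_outer + arr[stop]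
--     )
-- ===== SOURCE B (Python) =====
-- def equal_sum_split_check_helper(arr, start, stop, sum_inner, sum_outer):
--     if start >= stop:
--         return False
--     vals = [arr[i] for i in range(start, stop + 1)]
--     total = sum(vals)
--     diff = sum_inner - sum_outer
--     seen = set()
--     a, b = 0, vals[0]          # a = prefix sum before left cut, b = prefix including next
--     for x in vals[1:]:
--         seen.add(2 * a)
--         a, b = b, b + x
--         if diff - 2 * (total - b) in seen:
--             return True
--     return False
-- ===== Notes on version B (the rewrite author's own statement) =====
-- stated objective: alternative
-- what changed: Replaces the two-branch recursion over all (start,stop) trims by a single iterative pass with prefix sums and a hash set: the answer is whether some length>=2 window of the segment makes the trimmed-off sum equal half of sum_inner-sum_outer.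
-- outside the precondition, e.g. on equal_sum_split_check_helper([], 0, 5, 3, 3): A returns True, B raises IndexError
import Mathlib
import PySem

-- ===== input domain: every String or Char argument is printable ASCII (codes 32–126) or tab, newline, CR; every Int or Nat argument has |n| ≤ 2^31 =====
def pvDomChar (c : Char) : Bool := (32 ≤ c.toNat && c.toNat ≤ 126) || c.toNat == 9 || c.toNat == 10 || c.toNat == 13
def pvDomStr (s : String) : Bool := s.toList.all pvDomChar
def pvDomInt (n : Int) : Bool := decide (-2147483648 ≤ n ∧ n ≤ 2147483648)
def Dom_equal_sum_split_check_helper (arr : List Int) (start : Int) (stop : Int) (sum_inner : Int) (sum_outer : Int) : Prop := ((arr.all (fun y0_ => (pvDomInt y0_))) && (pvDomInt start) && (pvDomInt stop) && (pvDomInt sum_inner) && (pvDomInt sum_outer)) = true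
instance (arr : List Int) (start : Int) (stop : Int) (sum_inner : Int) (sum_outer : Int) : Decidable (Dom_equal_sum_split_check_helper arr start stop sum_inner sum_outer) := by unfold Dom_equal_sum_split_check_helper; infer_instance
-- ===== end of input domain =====

-- B replaces A's two-branch recursion over end-trims by one iterative pass with prefix sums and a
-- hash set (objective: alternative algorithm).

-- ===== PORT A =====
-- Literal port of A's recursion; where Python raises IndexError the pyGet? is none (those inputs are
-- excluded by Pre_ below, the port returns false there).
def equal_sum_split_check_helper (arr : List Int) (start : Int) (stop : Int) (sum_inner : Int) (sum_outer : Int) : Bool :=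
  if start ≥ stop then false
  else if sum_inner == sum_outer then true
  else
    match PySem.List.pyGet? arr start with
    | none => false  -- Python: IndexError (outside Pre_)
    | some a =>
      if equal_sum_split_check_helper arr (start + 1) stop (sum_inner - a) (sum_outer + a) then true
      else
        match PySem.List.pyGet? arr stop with
        | none => false  -- Python: IndexError (outside Pre_)
        | some b => equal_sum_split_check_helper arr start (stop - 1) (sum_inner - b) (sum_outer + b)
  termination_by (stop - start).toNat
  decreasing_by all_goals omega

-- ===== PORT B =====
-- the 'for x in vals[1:]' loop of Source B, carrying (seen, a, b)
def pvBLoop (total : Int) (diff : Int) (xs : List Int) (seen : PySem.Set Int) (a : Int) (b : Int) : Bool :=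
  match xs with
  | [] => false
  | x :: rest =>
    let seen' := PySem.Set.add seen (2 * a)
    let b' := b + x
    if PySem.Set.contains seen' (diff - 2 * (total - b')) then true
    else pvBLoop total diff rest seen' b b'

def equal_sum_split_check_helper_alt (arr : List Int) (start : Int) (stop : Int) (sum_inner : Int) (sum_outer : Int) : Bool :=
  if start ≥ stop then false
  else
    match (PySem.List.pyRange start (stop + 1) 1).mapM (fun i => PySem.List.pyGet? arr i) with
    | none => false  -- Python: IndexError while building vals (outside Pre_)
    | some vals =>
      let total := vals.sum
      let diff := sum_inner - sum_outer
      match vals with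
      | [] => false  -- unreachable: start < stop gives vals of length ≥ 2
      | v0 :: rest => pvBLoop total diff rest PySem.Set.empty 0 v0

-- ===== PRECONDITION & SPEC =====
-- Pre_ excludes inputs with start < stop where some index in [start, stop] falls outside
-- [-len(arr), len(arr)-1]: there A either raises IndexError or returns True via an early equal-sums
-- cut reached before touching the bad index, while B (which materialises the whole segment first)
-- always raises IndexError.
def Pre_equal_sum_split_check_helper (arr : List Int) (start : Int) (stop : Int) (sum_inner : Int) (sum_outer : Int) : Prop :=
  stop ≤ start ∨ (-(arr.length : Int) ≤ start ∧ stop < (arr.length : Int))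
instance (arr : List Int) (start : Int) (stop : Int) (sum_inner : Int) (sum_outer : Int) : Decidable (Pre_equal_sum_split_check_helper arr start stop sum_inner sum_outer) := by unfold Pre_equal_sum_split_check_helper; infer_instance

def pvWitness_equal_sum_split_check_helper : List Int × Int × Int × Int × Int := ([1, 2, 3], 0, 2, 6, 0)

def Spec_equal_sum_split_check_helper (arr : List Int) (start : Int) (stop : Int) (sum_inner : Int) (sum_outer : Int) (out : Bool) : Prop := out = equal_sum_split_check_helper_alt arr start stop sum_inner sum_outer
instance (arr : List Int) (start : Int) (stop : Int) (sum_inner : Int) (sum_outer : Int) (out : Bool) : Decidable (Spec_equal_sum_split_check_helper arr start stop sum_inner sum_outer out) := by unfold Spec_equal_sum_split_check_helper; infer_instance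

-- ===== CLAIM (what is proved, stated in full; the proofs are below) =====
def Claim_equal_equal_sum_split_check_helper : Prop := ∀ (arr : List Int) (start : Int) (stop : Int) (sum_inner : Int) (sum_outer : Int), Dom_equal_sum_split_check_helper arr start stop sum_inner sum_outer → Pre_equal_sum_split_check_helper arr start stop sum_inner sum_outer → Spec_equal_sum_split_check_helper arr start stop sum_inner sum_outer (equal_sum_split_check_helper arr start stop sum_inner sum_outer)

-- ===== LEMMAS AND PROOFS =====

-- value at Python index i (within range it is what arr[i] returns)
def pvV (arr : List Int) (i : Int) : Int := PySem.List.pyGetD arr i 0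

-- sum of the p values arr[s], arr[s+1], ..., arr[s+p-1]
def pvP (arr : List Int) (s : Int) (p : ℕ) : Int := ∑ k ∈ Finset.range p, pvV arr (s + k)

-- sum of the q values arr[t], arr[t-1], ..., arr[t-q+1]
def pvS (arr : List Int) (t : Int) (q : ℕ) : Int := ∑ k ∈ Finset.range q, pvV arr (t - k)

-- prefix sums of the materialised segment vals
def pvPref (vals : List Int) (k : ℕ) : Int := (vals.take k).sum

lemma pvGet_in_range (arr : List Int) (i : Int) (h1 : -(arr.length : Int) ≤ i) (h2 : i < (arr.length : Int)) :
    PySem.List.pyGet? arr i = some (pvV arr i) := by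
  have h : PySem.List.pyGet? arr i ≠ none := by
    intro hn
    rw [PySem.List.pyGet?_eq_none_iff] at hn
    exact hn ⟨h1, h2⟩
  cases hg : PySem.List.pyGet? arr i with
  | none => exact absurd hg h
  | some a => simp [pvV, PySem.List.pyGetD, hg]

lemma pvP_succ' (arr : List Int) (s : Int) (p : ℕ) :
    pvP arr s (p + 1) = pvV arr s + pvP arr (s + 1) p := by
  unfold pvP
  rw [Finset.sum_range_succ']
  simp [add_comm]
  exact Finset.sum_congr rfl (fun k _ => by rw [show s + ((k : Int) + 1) = (k : Int) + (s + 1) by ring])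

lemma pvS_succ' (arr : List Int) (t : Int) (q : ℕ) :
    pvS arr t (q + 1) = pvV arr t + pvS arr (t - 1) q := by
  unfold pvS
  rw [Finset.sum_range_succ']
  simp [add_comm]
  exact Finset.sum_congr rfl (fun k _ => by rw [show t - ((k : Int) + 1) = t - 1 - (k : Int) by ring])

-- characterisation of A: true iff some pair of trims (p values off the left end, q off the right)
-- keeping at least two elements makes the inner sum equal the outer sum
lemma pvKeyA : ∀ (N : ℕ) (arr : List Int) (s t si so : Int),
    (t - s).toNat ≤ N → -(arr.length : Int) ≤ s → t < (arr.length : Int) →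
    (equal_sum_split_check_helper arr s t si so = true ↔
      ∃ p q : ℕ, (p : Int) + q < t - s ∧ si - so = 2 * (pvP arr s p + pvS arr t q)) := by
  intro N
  induction N with
  | zero =>
    intro arr s t si so hN _ _
    have hts : t ≤ s := by omega
    rw [equal_sum_split_check_helper]
    simp [show s ≥ t from hts]
    intro p q h1 h2; omega
  | succ N ih =>
    intro arr s t si so hN h1 h2
    by_cases hts : s ≥ t
    · rw [equal_sum_split_check_helper]
      simp [hts]
      intro p q hpq h; omega
    · push_neg at hts
      by_cases heq : si = so
      · rw [equal_sum_split_check_helper]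
        simp [show ¬ (s ≥ t) by omega, heq]
        exact ⟨0, 0, by simpa using by omega, by simp [pvP, pvS]⟩
      · have ha := pvGet_in_range arr s (by omega) (by omega)
        have hb := pvGet_in_range arr t (by omega) (by omega)
        rw [equal_sum_split_check_helper]
        simp only [show ¬ (s ≥ t) by omega, if_false, beq_iff_eq, heq, ha, hb]
        have ihL := ih arr (s + 1) t (si - pvV arr s) (so + pvV arr s) (by omega) (by omega) h2
        have ihR := ih arr s (t - 1) (si - pvV arr t) (so + pvV arr t) (by omega) (by omega) (by omega)
        by_cases hL : equal_sum_split_check_helper arr (s + 1) t (si - pvV arr s) (so + pvV arr s) = true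
        · simp only [hL, if_true, true_iff]
          obtain ⟨p, q, hpq, he⟩ := ihL.mp hL
          refine ⟨p + 1, q, by push_cast; push_cast at hpq; omega, ?_⟩
          rw [pvP_succ']
          linarith
        · simp only [hL, if_false, Bool.false_eq_true]
          rw [ihR]
          constructor
          · rintro ⟨p, q, hpq, he⟩
            refine ⟨p, q + 1, by push_cast; push_cast at hpq; omega, ?_⟩
            rw [pvS_succ']
            linarith
          · rintro ⟨p, q, hpq, he⟩
            cases p with
            | succ p' =>
              exact absurd (ihL.mpr ⟨p', q, by push_cast; push_cast at hpq; omega,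
                by rw [pvP_succ'] at he; linarith⟩) hL
            | zero =>
              cases q with
              | zero =>
                exfalso; apply heq
                simp [pvP, pvS] at he
                omega
              | succ q' =>
                exact ⟨0, q', by push_cast; push_cast at hpq; omega,
                  by rw [pvS_succ'] at he; linarith⟩

lemma pvPref_succ (vals : List Int) (k : ℕ) (h : k < vals.length) :
    pvPref vals (k + 1) = pvPref vals k + vals[k] := by
  unfold pvPref
  rw [List.take_succ, List.sum_append, List.getElem?_eq_getElem h]
  simp

lemma pvMapM_get (arr : List Int) : ∀ (l : List Int),
    (∀ i ∈ l, PySem.List.pyGet? arr i = some (pvV arr i)) →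
    l.mapM (fun i => PySem.List.pyGet? arr i) = some (l.map (pvV arr)) := by
  intro l
  induction l with
  | nil => intro _; rfl
  | cons x xs ih =>
    intro h
    rw [List.mapM_cons, h x (by simp), ih (fun i hi => h i (by simp [hi]))]
    rfl

-- loop invariant of B's single pass: seen holds the doubled prefix sums strictly left of the window
lemma pvKeyLoop (vals : List Int) (diff : Int) : ∀ (xs : List Int) (j : ℕ) (seen : PySem.Set Int),
    xs = vals.drop (j + 1) →
    (∀ y : Int, y ∈ seen ↔ ∃ s : ℕ, s + 1 ≤ j ∧ y = 2 * pvPref vals s) →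
    (pvBLoop vals.sum diff xs seen (pvPref vals j) (pvPref vals (j + 1)) = true ↔
      ∃ t : ℕ, j + 1 ≤ t ∧ t < vals.length ∧
        ∃ s : ℕ, s < t ∧ diff - 2 * (vals.sum - pvPref vals (t + 1)) = 2 * pvPref vals s) := by
  intro xs
  induction xs with
  | nil =>
    intro j seen hx _
    have hlen : vals.length ≤ j + 1 := by
      have := congrArg List.length hx
      simp at this
      omega
    simp [pvBLoop]
    intro t h1 h2; omega
  | cons x rest ih =>
    intro j seen hx hseen
    have hlen : j + 1 < vals.length := by
      have := congrArg List.length hx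
      simp at this
      omega
    have hxval : x = vals[j + 1] := by
      have h0 : vals[j + 1 + 0]? = some x := by rw [← List.getElem?_drop, ← hx]; rfl
      simp [List.getElem?_eq_getElem (show j + 1 + 0 < vals.length by omega)] at h0
      exact h0.symm
    have hrest : rest = vals.drop (j + 2) := by
      have : (x :: rest).drop 1 = vals.drop (j + 2) := by
        rw [hx, List.drop_drop]
      simpa using this
    have hb' : pvPref vals (j + 1) + x = pvPref vals (j + 2) := by
      rw [hxval, ← pvPref_succ vals (j + 1) hlen]
    have hseen' : ∀ y : Int, y ∈ PySem.Set.add seen (2 * pvPref vals j) ↔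
        ∃ s : ℕ, s + 1 ≤ j + 1 ∧ y = 2 * pvPref vals s := by
      intro y
      rw [PySem.Set.mem_add, hseen]
      constructor
      · rintro (⟨s, hs1, hs2⟩ | h)
        · exact ⟨s, by omega, hs2⟩
        · exact ⟨j, by omega, h⟩
      · rintro ⟨s, hs1, hs2⟩
        by_cases hsj : s = j
        · right; rw [hs2, hsj]
        · left; exact ⟨s, by omega, hs2⟩
    rw [pvBLoop]
    simp only [hb']
    by_cases hc : PySem.Set.contains (PySem.Set.add seen (2 * pvPref vals j))
        (diff - 2 * (vals.sum - pvPref vals (j + 2))) = true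
    · rw [if_pos hc]
      simp only [true_iff]
      rw [PySem.Set.contains_iff] at hc
      obtain ⟨s, hs1, hs2⟩ := (hseen' _).mp hc
      exact ⟨j + 1, le_refl _, hlen, s, by omega, hs2⟩
    · rw [if_neg hc]
      rw [ih (j + 1) _ hrest hseen']
      constructor
      · rintro ⟨t, h1, h2, s, h3, h4⟩
        exact ⟨t, by omega, h2, s, h3, h4⟩
      · rintro ⟨t, h1, h2, s, h3, h4⟩
        by_cases htj : t = j + 1
        · exfalso
          apply hc
          rw [PySem.Set.contains_iff, hseen']
          subst htj
          exact ⟨s, by omega, h4⟩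
        · exact ⟨t, by omega, h2, s, h3, h4⟩

-- ===== VERDICT (by name: the statement is the Claim_ definition above) =====
theorem equal_sum_split_check_helper_spec : Claim_equal_equal_sum_split_check_helper := by
  intro arr start stop si so _ hpre
  unfold Spec_equal_sum_split_check_helper
  by_cases hss : start ≥ stop
  · rw [equal_sum_split_check_helper]
    unfold equal_sum_split_check_helper_alt
    simp [hss]
  · push_neg at hss
    have hr : -(arr.length : Int) ≤ start ∧ stop < (arr.length : Int) := by
      rcases hpre with h | h
      · omega
      · exact h
    obtain ⟨hr1, hr2⟩ := hr
    -- the materialised segment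
    set R := PySem.List.pyRange start (stop + 1) 1 with hR
    have hget : ∀ i ∈ R, PySem.List.pyGet? arr i = some (pvV arr i) := by
      intro i hi
      rw [hR, PySem.List.mem_pyRange_one] at hi
      exact pvGet_in_range arr i (by omega) (by omega)
    have hmm := pvMapM_get arr R hget
    set vals := R.map (pvV arr) with hvals
    have hcons : R = start :: PySem.List.pyRange (start + 1) (stop + 1) 1 :=
      PySem.List.pyRange_one_cons (by omega)
    have hvcons : vals = pvV arr start :: (PySem.List.pyRange (start + 1) (stop + 1) 1).map (pvV arr) := by
      rw [hvals, hcons, List.map_cons]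
    have hmlen : vals.length = (stop + 1 - start).toNat := by
      rw [hvals, List.length_map, hR, PySem.List.length_pyRange_one]
    have hmInt : (vals.length : Int) = stop + 1 - start := by rw [hmlen]; omega
    have hvelem : ∀ k : ℕ, (hk : k < vals.length) → vals[k] = pvV arr (start + k) := by
      intro k hk
      simp only [hvals, hR, List.getElem_map, PySem.List.getElem_pyRange_one]
    have hPref : ∀ k : ℕ, k ≤ vals.length → pvPref vals k = pvP arr start k := by
      intro k
      induction k with
      | zero => intro _; simp [pvPref, pvP]
      | succ n ihn =>
        intro h
        rw [pvPref_succ vals n (by omega), ihn (by omega), hvelem n (by omega)]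
        unfold pvP
        rw [Finset.sum_range_succ]
    have hsum : vals.sum = pvPref vals vals.length := by simp [pvPref]
    have hS : ∀ q : ℕ, q ≤ vals.length →
        pvS arr stop q = pvP arr start vals.length - pvP arr start (vals.length - q) := by
      intro q
      induction q with
      | zero => intro _; simp [pvS]
      | succ n ihn =>
        intro h
        have h1 : pvS arr stop (n + 1) = pvS arr stop n + pvV arr (stop - n) := by
          unfold pvS; rw [Finset.sum_range_succ]
        have h2 : vals.length - n = (vals.length - (n + 1)) + 1 := by omega
        have h3 : pvP arr start (vals.length - n)
            = pvP arr start (vals.length - (n + 1)) + pvV arr (start + (vals.length - (n + 1) : ℕ)) := by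
          rw [h2]; unfold pvP; rw [Finset.sum_range_succ]
        have h4 : start + ((vals.length - (n + 1) : ℕ) : Int) = stop - n := by omega
        rw [h1, ihn (by omega), h3, h4]
        ring
    have hBe : equal_sum_split_check_helper_alt arr start stop si so
        = pvBLoop vals.sum (si - so) ((PySem.List.pyRange (start + 1) (stop + 1) 1).map (pvV arr))
            PySem.Set.empty 0 (pvV arr start) := by
      unfold equal_sum_split_check_helper_alt
      rw [if_neg (by omega), ← hR, hmm, hvcons]
    have hA := pvKeyA (stop - start).toNat arr start stop si so (le_refl _) hr1 hr2
    have hrest0 : (PySem.List.pyRange (start + 1) (stop + 1) 1).map (pvV arr) = vals.drop (0 + 1) := by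
      rw [hvcons]; rfl
    have hseen0 : ∀ y : Int, y ∈ (PySem.Set.empty : PySem.Set Int) ↔
        ∃ s : ℕ, s + 1 ≤ 0 ∧ y = 2 * pvPref vals s := by
      intro y
      constructor
      · intro h; exact absurd h (by simp [PySem.Set.empty])
      · rintro ⟨s, hs, _⟩; omega
    have hp1 : pvPref vals 1 = pvV arr start := by rw [hvcons]; simp [pvPref]
    have hB := pvKeyLoop vals (si - so) _ 0 PySem.Set.empty hrest0 hseen0
    simp only [Nat.zero_add] at hB
    have hp0 : pvPref vals 0 = 0 := rfl
    rw [hp0, hp1] at hB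
    have hboot : ∀ a b : Bool, (a = true ↔ b = true) → a = b := by decide
    rw [hBe]
    apply hboot
    rw [hA, hB]
    constructor
    · rintro ⟨p, q, hpq, he⟩
      have hq : q + 1 < vals.length := by omega
      refine ⟨vals.length - 1 - q, by omega, by omega, p, by omega, ?_⟩
      have ht1 : vals.length - 1 - q + 1 = vals.length - q := by omega
      rw [ht1, hPref _ (by omega), hPref _ (by omega), hsum, hPref _ (le_refl _)]
      have hSq := hS q (by omega)
      linarith
    · rintro ⟨t, ht1, ht2, s, hs, he⟩
      refine ⟨s, vals.length - 1 - t, by omega, ?_⟩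
      have hq : vals.length - (vals.length - 1 - t) = t + 1 := by omega
      rw [hS _ (by omega), hq]
      rw [hsum, hPref _ (le_refl _), hPref _ (by omega), hPref _ (by omega)] at he
      linarith
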